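-- pv_equiv track=rewrite | github.com/Nathan-Mort/Study | DS_2/ex05/all_stocks.py | get_company
-- ===== SOURCE A (Python) =====
-- def companies():
--     COMPANIES = {
--         'Apple': 'AAPL',
--         'Microsoft': 'MSFT',
--         'Netflix': 'NFLX',
--         'Tesla': 'TSLA',
--         'Nokia': 'NOK'
--         }
--     return COMPANIES
--
-- def stocks():
--     STOCKS = {
--         'AAPL': 287.73,
--         'MSFT': 173.79,
--         'NFLX': 416.90,
--         'TSLA': 724.88,
--         'NOK': 3.37
--         }
--     return STOCKS
--
-- def get_company(part):
--     companies_dict = companies()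
--     stocks_dict = stocks()
--     if part.upper() in stocks_dict:
--         company_name = [name for name, symbol in companies_dict.items() if symbol == part.upper()]
--         if company_name:
--             company = company_name[0]
--         else:
--             company = None
--     else:
--         company = None
--     return company
-- ===== SOURCE B (Python) =====
-- def companies():
--     COMPANIES = {
--         'Apple': 'AAPL',
--         'Microsoft': 'MSFT',
--         'Netflix': 'NFLX',
--         'Tesla': 'TSLA',
--         'Nokia': 'NOK'
--         }
--     return COMPANIES
--
-- def stocks():
--     STOCKS = {
--         'AAPL': 287.73,
--         'MSFT': 173.79,
--         'NFLX': 416.90,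
--         'TSLA': 724.88,
--         'NOK': 3.37
--         }
--     return STOCKS
--
-- def get_company(part):
--     reverse = {symbol: name for name, symbol in companies().items()}
--     return reverse.get(part.upper())
-- ===== Notes on version B (the rewrite author's own statement) =====
-- stated objective: simpler
-- what changed: B builds the reverse symbol->name mapping once and returns a single dict .get lookup, replacing A's stocks-membership guard plus filtering list comprehension plus emptiness branch; the guard is redundant because companies() and stocks() carry the same symbol set.
import Mathlib
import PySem

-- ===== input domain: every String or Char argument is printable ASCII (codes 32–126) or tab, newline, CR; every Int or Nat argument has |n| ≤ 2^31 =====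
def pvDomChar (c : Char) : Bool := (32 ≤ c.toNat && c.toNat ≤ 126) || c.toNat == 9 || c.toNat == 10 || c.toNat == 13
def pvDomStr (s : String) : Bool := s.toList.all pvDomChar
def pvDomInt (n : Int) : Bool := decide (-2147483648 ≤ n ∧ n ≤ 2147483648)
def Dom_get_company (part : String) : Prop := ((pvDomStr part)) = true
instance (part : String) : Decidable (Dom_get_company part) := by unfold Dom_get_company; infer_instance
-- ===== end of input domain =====

-- ===== PORT A =====
-- B trades A's stocks-membership guard + filtering comprehension for one reverse-dict lookup (simpler).
-- stocks() values are floats, never used by the computation (only key membership); they are ported as Unit, exact for membership.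
def get_company (part : String) : Option String :=
  let companies_dict : PySem.Dict String String :=
    PySem.Dict.ofList [("Apple","AAPL"),("Microsoft","MSFT"),("Netflix","NFLX"),("Tesla","TSLA"),("Nokia","NOK")]
  let stocks_dict : PySem.Dict String Unit :=
    PySem.Dict.ofList [("AAPL",()),("MSFT",()),("NFLX",()),("TSLA",()),("NOK",())]
  if stocks_dict.contains (PySem.Str.upper part) then
    let company_name :=
      companies_dict.items.filterMap
        (fun p => if p.2 == PySem.Str.upper part then some p.1 else none)
    match company_name with
    | c :: _ => some c
    | [] => none
  else
    none

-- ===== PORT B =====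
def get_company_alt (part : String) : Option String :=
  let reverse : PySem.Dict String String :=
    PySem.Dict.ofList
      ((PySem.Dict.ofList [("Apple","AAPL"),("Microsoft","MSFT"),("Netflix","NFLX"),("Tesla","TSLA"),("Nokia","NOK")]).items.map
        (fun p => (p.2, p.1)))
  reverse.get? (PySem.Str.upper part)

-- ===== PRECONDITION & SPEC =====
def Spec_get_company (part : String) (out : Option String) : Prop := out = get_company_alt part
instance (part : String) (out : Option String) : Decidable (Spec_get_company part out) := by unfold Spec_get_company; infer_instance

-- ===== CLAIM (what is proved, stated in full; the proofs are below) =====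
def Claim_equal_get_company : Prop := ∀ (part : String), Dom_get_company part → Spec_get_company part (get_company part)

-- ===== LEMMAS AND PROOFS =====

-- ===== VERDICT (by name: the statement is the Claim_ definition above) =====
-- key lemma: for every symbol string u, A's body and B's body agree
theorem get_company_bodies_agree (u : String) :
    (let companies_dict : PySem.Dict String String :=
      PySem.Dict.ofList [("Apple","AAPL"),("Microsoft","MSFT"),("Netflix","NFLX"),("Tesla","TSLA"),("Nokia","NOK")]
     let stocks_dict : PySem.Dict String Unit :=
      PySem.Dict.ofList [("AAPL",()),("MSFT",()),("NFLX",()),("TSLA",()),("NOK",())]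
     if stocks_dict.contains u then
       match companies_dict.items.filterMap (fun p => if p.2 == u then some p.1 else none) with
       | c :: _ => some c
       | [] => none
     else none) =
    (PySem.Dict.ofList
      ((PySem.Dict.ofList [("Apple","AAPL"),("Microsoft","MSFT"),("Netflix","NFLX"),("Tesla","TSLA"),("Nokia","NOK")]).items.map
        (fun p => (p.2, p.1)))).get? u := by
  by_cases h1 : u = "AAPL"; · subst h1; decide
  by_cases h2 : u = "MSFT"; · subst h2; decide
  by_cases h3 : u = "NFLX"; · subst h3; decide
  by_cases h4 : u = "TSLA"; · subst h4; decide
  by_cases h5 : u = "NOK"; · subst h5; decide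
  have e1 : (PySem.Dict.ofList [("AAPL",(() : Unit)),("MSFT",()),("NFLX",()),("TSLA",()),("NOK",())])
      = PySem.Dict.mk [("AAPL",()),("MSFT",()),("NFLX",()),("TSLA",()),("NOK",())] := by decide
  have e2 : (PySem.Dict.ofList [("Apple","AAPL"),("Microsoft","MSFT"),("Netflix","NFLX"),("Tesla","TSLA"),("Nokia","NOK")])
      = PySem.Dict.mk [("Apple","AAPL"),("Microsoft","MSFT"),("Netflix","NFLX"),("Tesla","TSLA"),("Nokia","NOK")] := by decide
  simp only [e1, e2]
  simp [PySem.Dict.contains_mk, h1, h2, h3, h4, h5]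
  have e4 : (PySem.Dict.ofList [("AAPL","Apple"),("MSFT","Microsoft"),("NFLX","Netflix"),("TSLA","Tesla"),("NOK","Nokia")])
      = PySem.Dict.mk [("AAPL","Apple"),("MSFT","Microsoft"),("NFLX","Netflix"),("TSLA","Tesla"),("NOK","Nokia")] := by decide
  simp [e4, PySem.Dict.get?_mk_cons, Ne.symm h1, Ne.symm h2, Ne.symm h3, Ne.symm h4, Ne.symm h5]
  rfl

theorem get_company_spec : Claim_equal_get_company := by
  intro part _
  unfold Spec_get_company get_company get_company_alt
  exact get_company_bodies_agree (PySem.Str.upper part)
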